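-- pv_equiv track=rewrite | github.com/mmh132/ProjectEuler | work/P448.py | run3
-- ===== SOURCE A (Python) =====
-- def run3(n):
--     def ff(n):
--         return n*n
--     def gg(n):
--         rv = n
--         for i in range(2, n+1):
--             if n%i == 0: n//=i; rv *= -1
--             if n%i == 0: rv = 0
--         return rv
--     ret = 0
--     for i in range(1, n+1):
--         if n%i == 0:
--             ret += gg(n//i)*ff(i)
--     return ret
-- ===== SOURCE B (Python) =====
-- def run3(n):
--     def ff(m):
--         return m*m
--     def gg(m):
--         # m * mobius(m), by trial division up to sqrt of the shrinking cofactor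
--         sign = 1
--         r = m
--         d = 2
--         while d*d <= r:
--             if r % d == 0:
--                 r //= d
--                 if r % d == 0:
--                     return 0
--                 sign = -sign
--             d += 1
--         if 1 < r:
--             sign = -sign
--         return sign * m
--     ret = 0
--     i = 1
--     while i*i <= n:
--         if n % i == 0:
--             j = n // i
--             ret += gg(j)*ff(i)
--             if j != i:
--                 ret += gg(i)*ff(j)
--         i += 1
--     return ret
-- ===== Notes on version B (the rewrite author's own statement) =====
-- stated objective: faster
-- what changed: B enumerates divisors in pairs (i, n//i) with a while loop bounded by sqrt(n) instead of scanning every candidate up to n, and computes the Moebius factor by sqrt-bounded trial division instead of A's full linear scan.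
import Mathlib
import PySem

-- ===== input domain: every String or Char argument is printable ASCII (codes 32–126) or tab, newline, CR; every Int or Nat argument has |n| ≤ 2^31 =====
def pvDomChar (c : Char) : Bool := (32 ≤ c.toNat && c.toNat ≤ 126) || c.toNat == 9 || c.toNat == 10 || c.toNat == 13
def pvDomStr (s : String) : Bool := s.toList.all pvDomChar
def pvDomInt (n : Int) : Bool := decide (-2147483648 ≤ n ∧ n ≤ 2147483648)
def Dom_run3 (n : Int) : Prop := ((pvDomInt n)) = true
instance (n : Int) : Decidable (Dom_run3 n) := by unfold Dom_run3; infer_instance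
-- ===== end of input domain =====

-- B enumerates divisors in pairs (i, n//i) up to sqrt(n) and computes the Möbius factor by sqrt-bounded trial division, instead of A's two full linear scans: same exact result, far fewer iterations.


-- ===== PORT A =====
-- helper ff (nested def in Source A; Source B has its own identical one-liner)
def ff (n : Int) : Int := n * n

-- one iteration of gg's inner loop body: state (n, rv), loop variable i
def ggStep (st : Int × Int) (i : Int) : Int × Int :=
  let st1 := if PySem.Int.mod st.1 i = 0
             then (PySem.Int.floordiv st.1 i, st.2 * (-1)) else st
  if PySem.Int.mod st1.1 i = 0 then (st1.1, 0) else st1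

-- helper gg (nested def in Source A): for i in range(2, n+1) over state (n, rv)
def gg (n0 : Int) : Int :=
  ((PySem.List.pyRange 2 (n0 + 1) 1).foldl ggStep (n0, n0)).2

-- A: for i in range(1, n+1): if n % i == 0: ret += gg(n//i)*ff(i)
def run3 (n : Int) : Int :=
  (PySem.List.pyRange 1 (n + 1) 1).foldl
    (fun ret i =>
      if PySem.Int.mod n i = 0 then ret + gg (PySem.Int.floordiv n i) * ff i else ret)
    0

-- ===== PORT B =====
-- termination helper for B's while loops: i*i <= n forces i <= n
theorem pvLoopDec {n i : Int} (h : i * i ≤ n) : i ≤ n := by nlinarith [sq_nonneg i, sq_nonneg (i - 1)]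
-- termination helper: floor division of a nonnegative value never grows it
theorem pvFdivLe (a b : Int) (ha : 0 ≤ a) : PySem.Int.floordiv a b ≤ a := by
  unfold PySem.Int.floordiv
  rcases lt_trichotomy b 0 with h | h | h
  · have h2 : a / b ≤ 0 := Int.ediv_nonpos_of_nonneg_of_nonpos ha (le_of_lt h)
    rw [Int.fdiv_eq_ediv]
    split_ifs <;> omega
  · simp [h]; exact ha
  · rw [Int.fdiv_eq_ediv_of_nonneg a (le_of_lt h)]
    exact Int.ediv_le_self b ha

-- B's gg inner while loop: while d*d <= r: divide out d once, zero on a square, flip sign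
def ggBLoop (m sign r d : Int) : Int :=
  if d * d ≤ r then
    (if PySem.Int.mod r d = 0 then
      (if PySem.Int.mod (PySem.Int.floordiv r d) d = 0 then 0
       else ggBLoop m (-sign) (PySem.Int.floordiv r d) (d + 1))
     else ggBLoop m sign r (d + 1))
  else (if 1 < r then (-sign) * m else sign * m)
termination_by (r + 1 - d).toNat
decreasing_by
  · rename_i hB _hm _hm2
    have h0 : 0 ≤ r := le_trans (mul_self_nonneg d) hB
    have h1 := pvFdivLe r d h0
    have h2 := pvLoopDec hB
    omega
  · rename_i hB _hm
    have h2 := pvLoopDec hB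
    omega

-- B's gg (nested def in Source B): m * mobius(m) by sqrt-bounded trial division
def ggB (m : Int) : Int := ggBLoop m 1 m 2

-- ffB (nested def in Source B, identical one-liner)
def ffB (n : Int) : Int := n * n

-- B's outer while loop: while i*i <= n: handle the divisor pair (i, n//i)
def run3AltLoop (n i ret : Int) : Int :=
  if i * i ≤ n then
    run3AltLoop n (i + 1)
      (if PySem.Int.mod n i = 0 then
        let j := PySem.Int.floordiv n i
        let ret1 := ret + ggB j * ffB i
        if j ≠ i then ret1 + ggB i * ffB j else ret1
       else ret)
  else ret
termination_by (n + 1 - i).toNat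
decreasing_by
  rename_i h
  have := pvLoopDec h
  omega

def run3_alt (n : Int) : Int := run3AltLoop n 1 0

-- ===== PRECONDITION & SPEC =====
def Spec_run3 (n : Int) (out : Int) : Prop := out = run3_alt n
instance (n : Int) (out : Int) : Decidable (Spec_run3 n out) := by unfold Spec_run3; infer_instance

-- ===== CLAIM (what is proved, stated in full; the proofs are below) =====
def Claim_equal_run3 : Prop := ∀ (n : Int), Dom_run3 n → Spec_run3 n (run3 n)

-- ===== LEMMAS AND PROOFS =====

-- the common summand over naturals: pvF N d = gg(N/d) * ff(d), with A's gg
def pvF (N d : ℕ) : Int := gg ((N / d : ℕ) : Int) * ff (d : Int)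

-- the paired summand accumulated by B at each i ≤ sqrt N, with B's ggB
def pvFB (N d : ℕ) : Int := ggB ((N / d : ℕ) : Int) * ffB (d : Int)
def pvG (N d : ℕ) : Int :=
  if d ∣ N then pvF N d + (if N / d ≠ d then pvF N (N / d) else 0) else 0
def pvGB (N d : ℕ) : Int :=
  if d ∣ N then pvFB N d + (if N / d ≠ d then pvFB N (N / d) else 0) else 0

-- once rv = 0, it stays 0 through A's gg loop
theorem ggStep_snd_zero (r i : Int) : (ggStep (r, 0) i).2 = 0 := by
  simp only [ggStep]
  split_ifs <;> simp

theorem foldl_ggStep_zero (l : List Int) : ∀ r : Int, (l.foldl ggStep (r, 0)).2 = 0 := by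
  induction l with
  | nil => intro r; rfl
  | cons i t ih =>
    intro r
    rw [List.foldl_cons]
    rcases he : ggStep (r, 0) i with ⟨r', rv'⟩
    have h : rv' = 0 := by rw [← ggStep_snd_zero r i, he]
    rw [h]
    exact ih r'

-- iterations whose index does not divide the current cofactor are no-ops
theorem foldl_ggStep_noop (l : List Int) : ∀ (r rv : Int), (∀ i ∈ l, ¬ i ∣ r) →
    l.foldl ggStep (r, rv) = (r, rv) := by
  induction l with
  | nil => intro r rv _; rfl
  | cons i t ih =>
    intro r rv h
    have hmod : PySem.Int.mod r i ≠ 0 := fun hc =>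
      h i (List.mem_cons_self) ((PySem.Int.mod_eq_zero_iff_dvd r i).mp hc)
    rw [List.foldl_cons]
    have hstep : ggStep (r, rv) i = (r, rv) := by
      simp only [ggStep, if_neg hmod]
    rw [hstep]
    exact ih r rv (fun j hj => h j (List.mem_cons_of_mem _ hj))

-- the coupling: A's gg tail loop from state (r, sign*m) computes exactly B's ggBLoop
-- a nontrivial cofactor whose loop counter passed sqrt has no divisor below itself
theorem pv_no_mid_divisor (r d i : Int) (hd : 2 ≤ d) (hB : r < d * d)
    (hinv : ∀ e : Int, 2 ≤ e → e < d → ¬ e ∣ r) (hi1 : d ≤ i) (hi2 : i < r) : ¬ i ∣ r := by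
  intro hdvd
  have hr0 : 0 < r := by omega
  have hq : (r / i) * i = r := Int.ediv_mul_cancel hdvd
  have hqpos : 1 ≤ r / i := by nlinarith
  have hqne : r / i ≠ 1 := by
    intro h1
    rw [h1, one_mul] at hq
    omega
  have hqlt : r / i < d := by nlinarith
  exact hinv (r / i) (by omega) hqlt ⟨i, hq.symm⟩

theorem couple (m : Int) : ∀ (k : ℕ) (d r sign : Int), 2 ≤ d → 1 ≤ r → r ≤ m →
    (∀ e : Int, 2 ≤ e → e < d → ¬ e ∣ r) → k = (r + 1 - d).toNat →
    ((PySem.List.pyRange d (m + 1) 1).foldl ggStep (r, sign * m)).2 = ggBLoop m sign r d := by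
  intro k
  induction k using Nat.strong_induction_on with
  | _ k ih =>
  intro d r sign hd hr hrm hinv hk
  by_cases hB : d * d ≤ r
  · -- B's loop takes one more step; so does the next iteration of A's loop
    have hdr : d ≤ r := pvLoopDec hB
    rw [PySem.List.pyRange_one_cons (by omega), List.foldl_cons]
    by_cases hdvd : d ∣ r
    · have hmod : PySem.Int.mod r d = 0 := (PySem.Int.mod_eq_zero_iff_dvd r d).mpr hdvd
      have hfd : PySem.Int.floordiv r d = r / d := PySem.Int.floordiv_eq_ediv_of_pos (by omega)
      have hr1mul : (r / d) * d = r := Int.ediv_mul_cancel hdvd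
      have hr1pos : 1 ≤ r / d := by nlinarith
      have hr1le : r / d ≤ r := Int.ediv_le_self d (by omega)
      have hstep : ggStep (r, sign * m) d
          = (if PySem.Int.mod (r / d) d = 0 then ((r / d), 0) else ((r / d), sign * m * (-1))) := by
        simp only [ggStep, if_pos hmod, hfd]
      rw [hstep]
      by_cases h2 : PySem.Int.mod (r / d) d = 0
      · rw [if_pos h2, foldl_ggStep_zero]
        rw [ggBLoop, if_pos hB, if_pos hmod, hfd, if_pos h2]
      · rw [if_neg h2]
        have hdvd2 : ¬ d ∣ (r / d) := fun hc => h2 ((PySem.Int.mod_eq_zero_iff_dvd _ d).mpr hc)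
        have hsgn : sign * m * (-1) = (-sign) * m := by ring
        have hinv' : ∀ e : Int, 2 ≤ e → e < d + 1 → ¬ e ∣ (r / d) := by
          intro e he1 he2 hedvd
          rcases lt_or_eq_of_le (by omega : e ≤ d) with helt | heq
          · exact hinv e he1 helt (hedvd.trans ⟨d, hr1mul.symm⟩)
          · exact hdvd2 (heq ▸ hedvd)
        rw [hsgn, ih ((r / d) + 1 - (d + 1)).toNat (by omega) (d + 1) (r / d) (-sign)
          (by omega) hr1pos (by omega) hinv' rfl]
        conv_rhs => rw [ggBLoop]
        rw [if_pos hB, if_pos hmod, hfd, if_neg h2]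
    · have hmod : PySem.Int.mod r d ≠ 0 := fun hc => hdvd ((PySem.Int.mod_eq_zero_iff_dvd r d).mp hc)
      have hstep : ggStep (r, sign * m) d = (r, sign * m) := by
        simp only [ggStep, if_neg hmod]
      have hinv' : ∀ e : Int, 2 ≤ e → e < d + 1 → ¬ e ∣ r := by
        intro e he1 he2 hedvd
        rcases lt_or_eq_of_le (by omega : e ≤ d) with helt | heq
        · exact hinv e he1 helt hedvd
        · exact hdvd (heq ▸ hedvd)
      rw [hstep, ih (r + 1 - (d + 1)).toNat (by omega) (d + 1) r sign (by omega) hr hrm hinv' rfl]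
      conv_rhs => rw [ggBLoop]
      rw [if_pos hB, if_neg hmod]
  · -- B's loop exits; A's remaining iterations contribute at most the single hit i = r
    rw [ggBLoop, if_neg hB]
    rw [not_le] at hB
    by_cases hr2 : 1 < r
    · have hrd : d ≤ r := by
        by_contra hc
        rw [not_le] at hc
        exact hinv r (by omega) hc dvd_rfl
      have hrne : r ≠ 0 := by omega
      rw [PySem.List.pyRange_one_append d r (m + 1) (by omega) (by omega), List.foldl_append]
      rw [foldl_ggStep_noop _ r (sign * m) ?seg1]
      case seg1 =>
        intro i himem
        rw [PySem.List.mem_pyRange_one] at himem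
        exact pv_no_mid_divisor r d i hd hB hinv himem.1 himem.2
      rw [PySem.List.pyRange_one_cons (by omega), List.foldl_cons]
      have hnd1 : ¬ (r : Int) ∣ 1 := fun hc => by have := Int.le_of_dvd one_pos hc; omega
      have hstep : ggStep (r, sign * m) r = (1, sign * m * (-1)) := by
        have hmodr : PySem.Int.mod r r = 0 := (PySem.Int.mod_eq_zero_iff_dvd r r).mpr dvd_rfl
        have hfd : PySem.Int.floordiv r r = 1 := by
          rw [PySem.Int.floordiv_eq_ediv_of_pos (by omega), Int.ediv_self hrne]
        have hmod1 : PySem.Int.mod 1 r ≠ 0 := fun hc =>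
          hnd1 ((PySem.Int.mod_eq_zero_iff_dvd 1 r).mp hc)
        simp only [ggStep, if_pos hmodr, hfd, if_neg hmod1]
      rw [hstep, foldl_ggStep_noop _ 1 (sign * m * (-1)) ?seg3]
      case seg3 =>
        intro i himem
        rw [PySem.List.mem_pyRange_one] at himem
        intro hc
        have := Int.le_of_dvd one_pos hc
        omega
      rw [if_pos hr2]
      ring
    · have hr1 : r = 1 := by omega
      subst hr1
      rw [foldl_ggStep_noop _ 1 (sign * m) ?seg]
      case seg =>
        intro i himem
        rw [PySem.List.mem_pyRange_one] at himem
        intro hc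
        have := Int.le_of_dvd one_pos hc
        omega
      rw [if_neg hr2]

theorem gg_eq_ggB (m : Int) (hm : 1 ≤ m) : gg m = ggB m := by
  have h := couple m (m + 1 - 2).toNat 2 m 1 (by omega) hm le_rfl
    (fun e he1 he2 _ => absurd (lt_of_lt_of_le he2 he1) (lt_irrefl e)) rfl
  rw [one_mul] at h
  exact h

theorem runA_fold (N : ℕ) (M : ℕ) (init : Int) :
    (PySem.List.pyRange 1 ((M:Int) + 1) 1).foldl
      (fun ret i => if PySem.Int.mod (N:Int) i = 0 then ret + gg (PySem.Int.floordiv (N:Int) i) * ff i else ret) init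
    = init + ∑ d ∈ Finset.Ico 1 (M + 1), (if d ∣ N then pvF N d else 0) := by
  induction M generalizing init with
  | zero => rw [PySem.List.pyRange_one_eq_nil (by norm_num)]; simp
  | succ M ih =>
    have hsum : ∑ d ∈ Finset.Ico 1 (M+1+1), (if d ∣ N then pvF N d else 0)
        = (∑ d ∈ Finset.Ico 1 (M+1), (if d ∣ N then pvF N d else 0)) + (if (M+1) ∣ N then pvF N (M+1) else 0) :=
      Finset.sum_Ico_succ_top (by omega) _
    have hcast : ((M+1 : ℕ) : Int) + 1 = ((M:Int) + 1) + 1 := by push_cast; ring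
    have h1 : ((M:Int) + 1) = ((M+1 : ℕ) : Int) := by push_cast; ring
    rw [hsum, hcast, PySem.List.pyRange_one_succ_right (by omega), List.foldl_append, ih]
    have hmod : ((N % (M+1) : ℕ) : Int) = 0 ↔ (M+1) ∣ N := by
      rw [Int.natCast_eq_zero, ← Nat.dvd_iff_mod_eq_zero]
    simp only [List.foldl_cons, List.foldl_nil, h1, PySem.Int.mod_natCast,
      PySem.Int.floordiv_natCast, pvF]
    split_ifs with h h' h'
    · ring
    · rw [hmod] at h; exact absurd h h'
    · rw [hmod] at h; exact absurd h' h
    · ring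

theorem runB_loop (N : ℕ) (k : ℕ) : ∀ (i ret : Int), 1 ≤ i → k = Nat.sqrt N + 1 - i.toNat →
    run3AltLoop (N:Int) i ret = ret + ∑ d ∈ Finset.Ico i.toNat (Nat.sqrt N + 1), pvGB N d := by
  induction k with
  | zero =>
    intro i ret hi hk
    obtain ⟨d, rfl⟩ : ∃ d : ℕ, i = (d:Int) := ⟨i.toNat, by omega⟩
    have hd : Nat.sqrt N + 1 ≤ d := by omega
    have hno : ¬ ((d:Int) * (d:Int) ≤ (N:Int)) := by
      have h : N < d * d := Nat.sqrt_lt.mp (by omega)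
      exact_mod_cast not_le.mpr (by exact_mod_cast h)
    rw [run3AltLoop, if_neg hno, Finset.Ico_eq_empty (by simp; omega)]
    simp
  | succ k ih =>
    intro i ret hi hk
    obtain ⟨d, rfl⟩ : ∃ d : ℕ, i = (d:Int) := ⟨i.toNat, by omega⟩
    simp only [Int.toNat_natCast] at hk ⊢
    have hds : d ≤ Nat.sqrt N := by omega
    have hyes : ((d:Int) * (d:Int) ≤ (N:Int)) := by exact_mod_cast Nat.le_sqrt.mp hds
    have hmod : PySem.Int.mod (N:Int) (d:Int) = ((N % d : ℕ) : Int) := PySem.Int.mod_natCast N d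
    have hdvd : ((N % d : ℕ) : Int) = 0 ↔ d ∣ N := by
      rw [Int.natCast_eq_zero, ← Nat.dvd_iff_mod_eq_zero]
    rw [run3AltLoop, if_pos hyes]
    have hstep : ((d:Int) + 1) = ((d+1 : ℕ) : Int) := by omega
    have h1 : (1:Int) ≤ ((d+1 : ℕ) : Int) := by exact_mod_cast Nat.le_add_left 1 d
    have hk2 : k = Nat.sqrt N + 1 - (((d+1 : ℕ) : Int)).toNat := by rw [Int.toNat_natCast]; omega
    have hd1 : 1 ≤ d := by exact_mod_cast hi
    have hN : N ≠ 0 := by intro h0; subst h0; simp at hds; omega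
    rw [hstep, ih ((d+1 : ℕ) : Int) _ h1 hk2]
    simp only [Int.toNat_natCast]
    have hsplit : ∑ x ∈ Finset.Ico d (Nat.sqrt N + 1), pvGB N x
        = pvGB N d + ∑ x ∈ Finset.Ico (d+1) (Nat.sqrt N + 1), pvGB N x :=
      Finset.sum_eq_sum_Ico_succ_bot (by omega) _
    have hbody : (if PySem.Int.mod (N:Int) (d:Int) = 0 then
        let j := PySem.Int.floordiv (N:Int) (d:Int)
        let ret1 := ret + ggB j * ffB (d:Int)
        if j ≠ (d:Int) then ret1 + ggB (d:Int) * ffB j else ret1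
       else ret) = ret + pvGB N d := by
      rw [hmod, PySem.Int.floordiv_natCast]
      by_cases h : d ∣ N
      · rw [if_pos (hdvd.mpr h)]
        by_cases h' : N / d = d
        · rw [if_neg (by simp [h'] : ¬(((N/d : ℕ) : Int) ≠ (d:Int)))]
          simp only [pvGB, pvFB, if_pos h, if_neg (by simp [h'] : ¬(N/d ≠ d))]
          ring
        · rw [if_pos (by exact_mod_cast h' : (((N/d : ℕ) : Int) ≠ (d:Int)))]
          simp only [pvGB, pvFB, if_pos h, if_pos (h' : N/d ≠ d), Nat.div_div_self h hN]
          ring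
      · rw [if_neg (fun hc => h (hdvd.mp hc))]
        simp only [pvGB, if_neg h]
        ring
    rw [hbody, hsplit]
    ring

theorem pairing (N : ℕ) :
    ∑ d ∈ Finset.Ico 1 (N + 1), (if d ∣ N then pvF N d else 0) =
      ∑ d ∈ Finset.Ico 1 (Nat.sqrt N + 1), pvG N d := by
  rcases Nat.eq_zero_or_pos N with h0 | hN
  · subst h0; simp [pvG]
  have hN0 : N ≠ 0 := by omega
  have hss : Nat.sqrt N * Nat.sqrt N ≤ N := Nat.sqrt_le N
  have hlt : N < (Nat.sqrt N + 1) * (Nat.sqrt N + 1) := Nat.lt_succ_sqrt N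
  rw [← Finset.sum_filter]
  have hG : ∑ d ∈ Finset.Ico 1 (Nat.sqrt N + 1), pvG N d
      = ∑ d ∈ (Finset.Ico 1 (Nat.sqrt N + 1)).filter (· ∣ N),
          (pvF N d + (if N / d ≠ d then pvF N (N / d) else 0)) := by
    rw [Finset.sum_filter]; rfl
  rw [hG, Finset.sum_add_distrib, ← Finset.sum_filter]
  rw [← Finset.sum_filter_add_sum_filter_not ((Finset.Ico 1 (N + 1)).filter (· ∣ N))
    (· ≤ Nat.sqrt N) (pvF N)]
  have hsmall : ((Finset.Ico 1 (N + 1)).filter (· ∣ N)).filter (· ≤ Nat.sqrt N)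
      = (Finset.Ico 1 (Nat.sqrt N + 1)).filter (· ∣ N) := by
    ext d
    simp only [Finset.mem_filter, Finset.mem_Ico]
    constructor
    · rintro ⟨⟨⟨h1, _⟩, hdvd⟩, hle⟩
      exact ⟨⟨h1, by omega⟩, hdvd⟩
    · rintro ⟨⟨h1, h2⟩, hdvd⟩
      have := Nat.le_of_dvd hN hdvd
      exact ⟨⟨⟨h1, by omega⟩, hdvd⟩, by omega⟩
  have hlarge : ∑ d ∈ ((Finset.Ico 1 (N + 1)).filter (· ∣ N)).filter (fun d => ¬ d ≤ Nat.sqrt N), pvF N d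
      = ∑ d ∈ ((Finset.Ico 1 (Nat.sqrt N + 1)).filter (· ∣ N)).filter (fun d => N / d ≠ d),
          pvF N (N / d) := by
    refine Finset.sum_nbij' (fun d => N / d) (fun d => N / d) ?_ ?_ ?_ ?_ ?_
    · intro a ha
      simp only [Finset.mem_filter, Finset.mem_Ico] at ha ⊢
      obtain ⟨⟨⟨ha1, ha2⟩, hdvd⟩, hgt⟩ := ha
      have hmul : a * (N / a) = N := Nat.mul_div_cancel' hdvd
      have hpos : 1 ≤ N / a := Nat.div_pos (Nat.le_of_dvd hN hdvd) (by omega)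
      have hle : N / a ≤ Nat.sqrt N := by
        by_contra hc
        nlinarith
      refine ⟨⟨⟨hpos, by omega⟩, Nat.div_dvd_of_dvd hdvd⟩, ?_⟩
      rw [Nat.div_div_self hdvd hN0]
      omega
    · intro b hb
      simp only [Finset.mem_filter, Finset.mem_Ico] at hb ⊢
      obtain ⟨⟨⟨hb1, hb2⟩, hdvd⟩, hne⟩ := hb
      have hmul : b * (N / b) = N := Nat.mul_div_cancel' hdvd
      have hpos : 1 ≤ N / b := Nat.div_pos (Nat.le_of_dvd hN hdvd) (by omega)
      refine ⟨⟨⟨hpos, by have := Nat.div_le_self N b; omega⟩, Nat.div_dvd_of_dvd hdvd⟩, ?_⟩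
      intro hc
      rcases Nat.lt_or_ge b (N / b) with hlt' | hge
      · nlinarith
      · have : N / b < b := by omega
        nlinarith
    · intro a ha
      simp only [Finset.mem_filter] at ha
      exact Nat.div_div_self ha.1.2 hN0
    · intro b hb
      simp only [Finset.mem_filter] at hb
      exact Nat.div_div_self hb.1.2 hN0
    · intro a ha
      simp only [Finset.mem_filter] at ha
      rw [Nat.div_div_self ha.1.2 hN0]
  rw [hsmall, hlarge]

-- with A's gg and B's ggB agreeing on positive arguments, the paired summands agree
theorem sum_pvGB_eq_pvG (N : ℕ) (hN : 1 ≤ N) :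
    ∑ d ∈ Finset.Ico 1 (Nat.sqrt N + 1), pvGB N d
      = ∑ d ∈ Finset.Ico 1 (Nat.sqrt N + 1), pvG N d := by
  refine Finset.sum_congr rfl ?_
  intro d hd
  rw [Finset.mem_Ico] at hd
  unfold pvGB pvG pvFB pvF ffB ff
  by_cases h : d ∣ N
  · have hd1 : 1 ≤ d := hd.1
    have hNd : 1 ≤ N / d := Nat.div_pos (Nat.le_of_dvd hN h) hd1
    have hN0 : N ≠ 0 := by omega
    rw [if_pos h, if_pos h, gg_eq_ggB _ (by exact_mod_cast hNd)]
    by_cases h' : N / d ≠ d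
    · rw [if_pos h', if_pos h', Nat.div_div_self h hN0,
        gg_eq_ggB _ (by exact_mod_cast hd1)]
    · rw [if_neg h', if_neg h']
  · rw [if_neg h, if_neg h]

theorem run3_eq_sum (N : ℕ) :
    run3 (N : Int) = ∑ d ∈ Finset.Ico 1 (N + 1), (if d ∣ N then pvF N d else 0) := by
  unfold run3
  rw [runA_fold N N 0]
  simp

theorem run3_alt_eq_sum (N : ℕ) :
    run3_alt (N : Int) = ∑ d ∈ Finset.Ico 1 (Nat.sqrt N + 1), pvGB N d := by
  unfold run3_alt
  rw [runB_loop N (Nat.sqrt N) 1 0 (by norm_num) (by simp)]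
  simp

-- ===== VERDICT (by name: the statement is the Claim_ definition above) =====
theorem run3_spec : Claim_equal_run3 := by
  intro n _
  unfold Spec_run3
  rcases le_or_gt n 0 with hn | hn
  · unfold run3 run3_alt
    rw [PySem.List.pyRange_one_eq_nil (by omega), run3AltLoop]
    simp
    omega
  · obtain ⟨N, rfl⟩ : ∃ N : ℕ, n = (N : Int) := ⟨n.toNat, by omega⟩
    have hN : 1 ≤ N := by exact_mod_cast hn
    rw [run3_eq_sum, run3_alt_eq_sum, pairing, sum_pvGB_eq_pvG N hN]
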